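-- pv_equiv track=rewrite | github.com/ntdung6868/kho-tri-thuc-trangtri360 | convert_json_to_md.py | remove_duplicate_blocks
-- ===== SOURCE A (Python) =====
-- def remove_duplicate_blocks(content: str) -> str:
--     """
--     Xóa các block heading+content bị lặp đôi.
--     Rất thường gặp với badge thống kê:
--       #### 10000+
--       Đơn hàng
--
--       #### 10000+   <- duplicate!
--       Đơn hàng
--     """
--     lines = content.split('\n')
--     result = []
--     seen_pairs: set = set()
--     i = 0
--
--     while i < len(lines):
--         current = lines[i].strip()
--
--         if current.startswith('#'):
--             # Tìm dòng kế không rỗng để tạo fingerprint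
--             j = i + 1
--             while j < len(lines) and not lines[j].strip():
--                 j += 1
--             next_line = lines[j].strip() if j < len(lines) else ''
--
--             pair_key = f"{current}|{next_line}"
--
--             if pair_key in seen_pairs and current.strip('#').strip():
--                 # Bỏ qua duplicate block (heading + content đến heading tiếp theo)
--                 i += 1
--                 while i < len(lines):
--                     if lines[i].strip().startswith('#'):
--                         break
--                     i += 1
--                 continue
--
--             if current.strip('#').strip():
--                 seen_pairs.add(pair_key)
--
--         result.append(lines[i])
--         i += 1
--
--     return '\n'.join(result)
-- ===== SOURCE B (Python) =====
-- def first_nonblank(lines):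
--     for l in lines:
--         s = l.strip()
--         if s:
--             return s
--     return ''
--
-- def remove_duplicate_blocks(content: str) -> str:
--     lines = content.split('\n')
--     heads = [k for k in range(len(lines)) if lines[k].strip().startswith('#')]
--     out = lines[:heads[0]] if heads else lines[:]
--     seen = set()
--     for b, h in enumerate(heads):
--         end = heads[b + 1] if b + 1 < len(heads) else len(lines)
--         cur = lines[h].strip()
--         key = cur + '|' + first_nonblank(lines[h + 1:])
--         has_content = bool(cur.strip('#').strip())
--         if has_content and key in seen:
--             continue
--         if has_content:
--             seen.add(key)
--         out.extend(lines[h:end])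
--     return '\n'.join(out)
-- ===== Notes on version B (the rewrite author's own statement) =====
-- stated objective: alternative
-- what changed: A walks a single index with a nested skip-ahead while-loop inside the main while; B first computes the list of heading line indices, then iterates once over headings as explicit [start,end) blocks, emitting or dropping each whole block slice against a seen-fingerprint set.
import Mathlib
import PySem

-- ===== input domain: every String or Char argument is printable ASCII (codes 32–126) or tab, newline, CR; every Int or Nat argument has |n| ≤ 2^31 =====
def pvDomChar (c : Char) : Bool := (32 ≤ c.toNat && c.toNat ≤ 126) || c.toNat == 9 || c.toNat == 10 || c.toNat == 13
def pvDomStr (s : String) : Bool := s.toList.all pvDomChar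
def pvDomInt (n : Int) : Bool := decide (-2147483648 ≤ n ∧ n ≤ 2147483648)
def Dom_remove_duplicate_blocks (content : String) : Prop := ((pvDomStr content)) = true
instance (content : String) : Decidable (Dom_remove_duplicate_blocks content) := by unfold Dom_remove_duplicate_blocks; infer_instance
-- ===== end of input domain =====

-- B replaces A's single-index walk (with its nested skip-ahead while) by: compute heading indices first, then one pass over explicit [start,end) blocks; same cost, alternative decomposition.

-- ===== PORT A =====
-- shared one-line predicates (the identical Python expressions occur in both programs)
def pvIsHead (s : String) : Bool := PySem.Str.startswith (PySem.Str.strip s) "#"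
def pvHasContent (cur : String) : Bool := PySem.Str.strip (PySem.Str.stripChars cur "#") != ""

-- inner "while j < len(lines) and not lines[j].strip(): j += 1"
def pvFindNext (lines : List String) (j : Nat) : Nat :=
  if _ : j < lines.length then
    if PySem.Str.strip (lines.getD j "") = "" then pvFindNext lines (j + 1) else j
  else j
termination_by lines.length - j

-- inner "while i < len(lines): if lines[i].strip().startswith('#'): break; i += 1"
def pvSkipDup (lines : List String) (i : Nat) : Nat :=
  if _ : i < lines.length then
    if pvIsHead (lines.getD i "") then i else pvSkipDup lines (i + 1)
  else i
termination_by lines.length - i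

-- needed by pvLoopA's termination
theorem pvSkipDup_ge (lines : List String) (i : Nat) : i ≤ pvSkipDup lines i := by
  fun_induction pvSkipDup lines i with
  | case1 => omega
  | case2 _ _ _ ih => omega
  | case3 => omega

-- the main "while i < len(lines)" loop of A
def pvLoopA (lines : List String) (i : Nat) (seen : PySem.Set String) (result : List String) : List String :=
  if _ : i < lines.length then
    let current := PySem.Str.strip (lines.getD i "")
    if PySem.Str.startswith current "#" then
      let j := pvFindNext lines (i + 1)
      let next_line := if j < lines.length then PySem.Str.strip (lines.getD j "") else ""
      let pair_key := current ++ "|" ++ next_line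
      if PySem.Set.contains seen pair_key && pvHasContent current then
        pvLoopA lines (pvSkipDup lines (i + 1)) seen result
      else
        let seen' := if pvHasContent current then PySem.Set.add seen pair_key else seen
        pvLoopA lines (i + 1) seen' (result ++ [lines.getD i ""])
    else
      pvLoopA lines (i + 1) seen (result ++ [lines.getD i ""])
  else result
termination_by lines.length - i
decreasing_by
  · have := pvSkipDup_ge lines (i + 1); omega
  · omega
  · omega

def remove_duplicate_blocks (content : String) : String :=
  PySem.Str.join "\n" (pvLoopA ((PySem.Str.split? content "\n").getD []) 0 PySem.Set.empty [])

-- ===== PORT B =====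
-- "for l in lines: s = l.strip(); if s: return s / return ''"
def pvFirstNonblank : List String → String
  | [] => ""
  | l :: ls => let s := PySem.Str.strip l; if s != "" then s else pvFirstNonblank ls

-- "[k for k in range(len(lines)) if lines[k].strip().startswith('#')]"
def pvHeadIdx (lines : List String) : List Nat :=
  (List.range lines.length).filter (fun k => pvIsHead (lines.getD k ""))

-- "for b, h in enumerate(heads): …"  (the slices lines[h:end] with 0 ≤ h ≤ end are exactly drop/take)
def pvLoopB (lines : List String) (heads : List Nat) (seen : PySem.Set String) (out : List String) : List String :=
  match heads with
  | [] => out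
  | h :: rest =>
    let endIdx := match rest with | [] => lines.length | h2 :: _ => h2
    let cur := PySem.Str.strip (lines.getD h "")
    let key := cur ++ "|" ++ pvFirstNonblank (lines.drop (h + 1))
    if pvHasContent cur && PySem.Set.contains seen key then
      pvLoopB lines rest seen out
    else
      let seen' := if pvHasContent cur then PySem.Set.add seen key else seen
      pvLoopB lines rest seen' (out ++ (lines.drop h).take (endIdx - h))

def remove_duplicate_blocks_alt (content : String) : String :=
  let lines := (PySem.Str.split? content "\n").getD []
  let heads := pvHeadIdx lines
  let out0 := match heads with | [] => lines | h :: _ => lines.take h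
  PySem.Str.join "\n" (pvLoopB lines heads PySem.Set.empty out0)

-- ===== PRECONDITION & SPEC =====
def Spec_remove_duplicate_blocks (content : String) (out : String) : Prop := out = remove_duplicate_blocks_alt content
instance (content : String) (out : String) : Decidable (Spec_remove_duplicate_blocks content out) := by unfold Spec_remove_duplicate_blocks; infer_instance

-- ===== CLAIM (what is proved, stated in full; the proofs are below) =====
def Claim_equal_remove_duplicate_blocks : Prop := ∀ (content : String), Dom_remove_duplicate_blocks content → Spec_remove_duplicate_blocks content (remove_duplicate_blocks content)

-- ===== LEMMAS AND PROOFS =====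

theorem pvSkipDup_le (lines : List String) (i : Nat) (h : i ≤ lines.length) :
    pvSkipDup lines i ≤ lines.length := by
  fun_induction pvSkipDup lines i with
  | case1 => omega
  | case2 _ h' _ ih => exact ih (by omega)
  | case3 => omega

theorem pvSkipDup_not_head (lines : List String) (i : Nat) :
    ∀ j, i ≤ j → j < pvSkipDup lines i → pvIsHead (lines.getD j "") = false := by
  fun_induction pvSkipDup lines i with
  | case1 i h hh => intro j h1 h2; omega
  | case2 i h hh ih =>
    intro j h1 h2
    rcases Nat.eq_or_lt_of_le h1 with rfl | hlt
    · simpa using hh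
    · exact ih j hlt h2
  | case3 i h => intro j h1 h2; omega

theorem pvSkipDup_head (lines : List String) (i : Nat)
    (h : pvSkipDup lines i < lines.length) : pvIsHead (lines.getD (pvSkipDup lines i) "") = true := by
  fun_induction pvSkipDup lines i with
  | case1 i h' hh => simpa using hh
  | case2 i h' hh ih => exact ih h
  | case3 i h' => omega

theorem pvSkipDup_idem (lines : List String) (i : Nat) :
    pvSkipDup lines (pvSkipDup lines i) = pvSkipDup lines i := by
  by_cases h : pvSkipDup lines i < lines.length
  · rw [pvSkipDup, dif_pos h, pvSkipDup_head lines i h]; simp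
  · rw [pvSkipDup, dif_neg h]

-- B's next-nonblank scan computes exactly A's j-scan value
theorem pvFirstNonblank_eq (lines : List String) (i : Nat) :
    pvFirstNonblank (lines.drop i) =
      if pvFindNext lines i < lines.length then
        PySem.Str.strip (lines.getD (pvFindNext lines i) "") else "" := by
  fun_induction pvFindNext lines i with
  | case1 i h hblank ih =>
    have hg : lines.getD i "" = lines[i] := List.getD_eq_getElem lines "" h
    rw [hg] at hblank
    rw [List.drop_eq_getElem_cons h, pvFirstNonblank]
    simp [hblank, ih]
  | case2 i h hblank =>
    have hg : lines.getD i "" = lines[i] := List.getD_eq_getElem lines "" h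
    rw [hg] at hblank
    rw [List.drop_eq_getElem_cons h, pvFirstNonblank]
    simp [h, bne_iff_ne, hblank]
  | case3 i h =>
    rw [List.drop_eq_nil_of_le (by omega), pvFirstNonblank]
    simp [h]

-- membership in B's heading-index list
theorem mem_pvHeadIdx (lines : List String) (k : Nat) :
    k ∈ pvHeadIdx lines ↔ k < lines.length ∧ pvIsHead (lines.getD k "") = true := by
  simp [pvHeadIdx, List.mem_filter, List.mem_range]

theorem pvHeadIdx_sorted (lines : List String) : (pvHeadIdx lines).Pairwise (· < ·) :=
  List.Pairwise.sublist List.filter_sublist (List.pairwise_lt_range)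

-- sorted-list filter decomposition at a member
theorem filter_sorted_cons {l : List Nat} (hs : l.Pairwise (· < ·)) {h : Nat} (hm : h ∈ l) :
    l.filter (fun k => decide (h ≤ k)) = h :: l.filter (fun k => decide (h + 1 ≤ k)) := by
  induction l with
  | nil => cases hm
  | cons a t ih =>
    have ha : ∀ b ∈ t, a < b := fun b hb => (List.pairwise_cons.1 hs).1 b hb
    rcases List.mem_cons.1 hm with rfl | hmt
    · have h1 : ∀ b ∈ t, decide (h ≤ b) = true := fun b hb => by
        have := ha b hb; simp; omega
      have h2 : ∀ b ∈ t, decide (h + 1 ≤ b) = true := fun b hb => by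
        have := ha b hb; simp; omega
      rw [List.filter_cons_of_pos (by simp), List.filter_cons_of_neg (by simp),
        List.filter_eq_self.2 h1, List.filter_eq_self.2 h2]
    · have hlt : a < h := ha h hmt
      have : ¬ (h ≤ a) := by omega
      have : ¬ (h + 1 ≤ a) := by omega
      simp only [List.filter_cons]
      rw [if_neg (by simpa), if_neg (by simpa)]
      exact ih (List.Pairwise.of_cons hs) hmt

-- filtering from i equals filtering from pvSkipDup i (no heading lies in between)
theorem filter_skip_congr (lines : List String) (i : Nat) :
    (pvHeadIdx lines).filter (fun k => decide (i ≤ k)) =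
      (pvHeadIdx lines).filter (fun k => decide (pvSkipDup lines i ≤ k)) := by
  apply List.filter_congr
  intro k hk
  have hmem := (mem_pvHeadIdx lines k).1 hk
  by_cases hik : i ≤ k
  · have : ¬ (k < pvSkipDup lines i) := fun hlt => by
      have hcon := pvSkipDup_not_head lines i k hik hlt
      exact absurd (hmem.2.symm.trans hcon) (by decide)
    simp; omega
  · have := pvSkipDup_ge lines i
    simp; omega

-- the key decomposition of B's remaining-heads list
theorem pvHeadIdx_decomp (lines : List String) (i : Nat) :
    (pvHeadIdx lines).filter (fun k => decide (i ≤ k)) =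
      if pvSkipDup lines i < lines.length then
        pvSkipDup lines i :: (pvHeadIdx lines).filter (fun k => decide (pvSkipDup lines i + 1 ≤ k))
      else [] := by
  rw [filter_skip_congr]
  by_cases h : pvSkipDup lines i < lines.length
  · rw [if_pos h]
    exact filter_sorted_cons (pvHeadIdx_sorted lines)
      ((mem_pvHeadIdx lines _).2 ⟨h, pvSkipDup_head lines i h⟩)
  · rw [if_neg h]
    apply List.filter_eq_nil_iff.2
    intro k hk
    have hmem := (mem_pvHeadIdx lines k).1 hk
    have := pvSkipDup_le lines i
    simp; omega

-- one non-heading step of A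
theorem pvLoopA_nonhead (lines : List String) (i : Nat) (seen : PySem.Set String) (res : List String)
    (h : i < lines.length) (hh : pvIsHead (lines.getD i "") = false) :
    pvLoopA lines i seen res = pvLoopA lines (i + 1) seen (res ++ [lines.getD i ""]) := by
  rw [pvLoopA]
  rw [List.getD_eq_getElem lines "" h] at hh
  simp only [pvIsHead] at hh
  simp at hh
  simp [h, hh]

-- one heading step of A, with the j-scan replaced by its value
theorem pvLoopA_head (lines : List String) (i : Nat) (seen : PySem.Set String) (res : List String)
    (h : i < lines.length) (hh : pvIsHead (lines.getD i "") = true) :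
    pvLoopA lines i seen res =
      (if PySem.Set.contains seen (PySem.Str.strip (lines.getD i "") ++ "|" ++ pvFirstNonblank (lines.drop (i + 1)))
            && pvHasContent (PySem.Str.strip (lines.getD i "")) then
        pvLoopA lines (pvSkipDup lines (i + 1)) seen res
      else
        pvLoopA lines (i + 1)
          (if pvHasContent (PySem.Str.strip (lines.getD i "")) then
            PySem.Set.add seen (PySem.Str.strip (lines.getD i "") ++ "|" ++ pvFirstNonblank (lines.drop (i + 1)))
          else seen)
          (res ++ [lines.getD i ""])) := by
  conv_lhs => rw [pvLoopA]
  rw [pvFirstNonblank_eq]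
  rw [List.getD_eq_getElem lines "" h] at hh
  simp only [pvIsHead] at hh
  simp at hh
  simp [h, hh]

-- A's walk over a headingless region appends it wholesale
theorem pvLoopA_walk (lines : List String) (i : Nat) (seen : PySem.Set String) :
    ∀ res, pvLoopA lines i seen res =
      pvLoopA lines (pvSkipDup lines i) seen (res ++ (lines.drop i).take (pvSkipDup lines i - i)) := by
  fun_induction pvSkipDup lines i with
  | case1 i h hh => intro res; simp
  | case2 i h hh ih =>
    intro res
    have hh' : pvIsHead (lines.getD i "") = false := by
      cases hb : pvIsHead (lines.getD i "") with
      | false => rfl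
      | true => exact absurd hb hh
    have hge := pvSkipDup_ge lines (i + 1)
    have hsub : pvSkipDup lines (i + 1) - i = (pvSkipDup lines (i + 1) - (i + 1)) + 1 := by omega
    have harg : res ++ [lines.getD i ""] ++ (List.drop (i + 1) lines).take (pvSkipDup lines (i + 1) - (i + 1))
        = res ++ (List.drop i lines).take (pvSkipDup lines (i + 1) - i) := by
      rw [List.append_assoc, List.append_right_inj]
      rw [List.drop_eq_getElem_cons h, hsub, List.take_succ_cons, List.getD_eq_getElem lines "" h]
      rfl
    rw [pvLoopA_nonhead lines i seen res h hh', ih]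
    exact congrArg (pvLoopA lines (pvSkipDup lines (i + 1)) seen) harg
  | case3 i h => intro res; simp

-- one step of B on a cons heads list (definitional unfolding)
theorem pvLoopB_cons (lines : List String) (h : Nat) (rest : List Nat)
    (seen : PySem.Set String) (out : List String) :
    pvLoopB lines (h :: rest) seen out =
      (if pvHasContent (PySem.Str.strip (lines.getD h "")) &&
          PySem.Set.contains seen
            (PySem.Str.strip (lines.getD h "") ++ "|" ++ pvFirstNonblank (lines.drop (h + 1))) then
        pvLoopB lines rest seen out
      else
        pvLoopB lines rest
          (if pvHasContent (PySem.Str.strip (lines.getD h "")) then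
            PySem.Set.add seen
              (PySem.Str.strip (lines.getD h "") ++ "|" ++ pvFirstNonblank (lines.drop (h + 1)))
          else seen)
          (out ++ (lines.drop h).take
            ((match rest with | [] => lines.length | h2 :: _ => h2) - h))) := rfl

-- the bridge: A's loop from any i ≤ len equals B's loop over the remaining heads
theorem pvLoop_bridge (lines : List String) : ∀ (n i : Nat) (seen : PySem.Set String) (res : List String),
    lines.length - i ≤ n → i ≤ lines.length →
    pvLoopA lines i seen res =
      pvLoopB lines ((pvHeadIdx lines).filter (fun k => decide (i ≤ k))) seen
        (res ++ (lines.drop i).take (pvSkipDup lines i - i)) := by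
  intro n
  induction n with
  | zero =>
    intro i seen res hn hi
    have hi' : i = lines.length := by omega
    subst hi'
    have hskip : pvSkipDup lines lines.length = lines.length := by
      rw [pvSkipDup]; simp
    rw [pvHeadIdx_decomp, hskip, if_neg (by omega), pvLoopB, pvLoopA, dif_neg (by omega)]
    simp
  | succ n ih =>
    intro i seen res hn hi
    rw [pvHeadIdx_decomp]
    by_cases hlen : pvSkipDup lines i < lines.length
    · rw [if_pos hlen]
      set s := pvSkipDup lines i with hs
      have hge := pvSkipDup_ge lines i
      have hge2 := pvSkipDup_ge lines (s + 1)
      have hle2 := pvSkipDup_le lines (s + 1) (by omega)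
      -- walk A to the heading s, then take one heading step
      rw [pvLoopA_walk, ← hs, pvLoopA_head lines s seen _ hlen (hs ▸ pvSkipDup_head lines i hlen)]
      -- unfold B one step
      rw [pvLoopB_cons]
      have hend : (match (pvHeadIdx lines).filter (fun k => decide (s + 1 ≤ k)) with
          | [] => lines.length | h2 :: _ => h2) = pvSkipDup lines (s + 1) := by
        rw [pvHeadIdx_decomp]
        by_cases h2 : pvSkipDup lines (s + 1) < lines.length
        · rw [if_pos h2]
        · rw [if_neg h2]
          show lines.length = pvSkipDup lines (s + 1)
          omega
      by_cases hdup : (PySem.Set.contains seen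
          (PySem.Str.strip (lines.getD s "") ++ "|" ++ pvFirstNonblank (lines.drop (s + 1)))
          && pvHasContent (PySem.Str.strip (lines.getD s ""))) = true
      · rw [if_pos hdup, if_pos ((Bool.and_comm _ _).trans hdup)]
        rw [ih (pvSkipDup lines (s + 1)) seen _ (by omega) (by omega)]
        rw [filter_skip_congr lines (s + 1), pvSkipDup_idem]
        simp
      · rw [if_neg hdup, if_neg (fun hc => hdup ((Bool.and_comm _ _).trans hc))]
        rw [ih (s + 1) _ _ (by omega) (by omega)]
        rw [hend]
        apply congrArg
        have hsub : pvSkipDup lines (s + 1) - s = (pvSkipDup lines (s + 1) - (s + 1)) + 1 := by omega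
        rw [List.append_assoc, List.append_assoc, List.append_assoc, List.append_right_inj,
          List.append_right_inj]
        rw [List.drop_eq_getElem_cons hlen, hsub, List.take_succ_cons, List.getD_eq_getElem lines "" hlen]
        rfl
    · rw [if_neg hlen]
      have hle := pvSkipDup_le lines i hi
      have hge := pvSkipDup_ge lines i
      have hsl : pvSkipDup lines i = lines.length := by omega
      rw [pvLoopA_walk, hsl, pvLoopA, dif_neg (by omega), pvLoopB]

-- ===== VERDICT (by name: the statement is the Claim_ definition above) =====
theorem remove_duplicate_blocks_spec : Claim_equal_remove_duplicate_blocks := by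
  intro content _
  unfold Spec_remove_duplicate_blocks remove_duplicate_blocks remove_duplicate_blocks_alt
  set lines := (PySem.Str.split? content "\n").getD [] with hl
  congr 1
  have h0 : (pvHeadIdx lines).filter (fun k => decide (0 ≤ k)) = pvHeadIdx lines := by
    apply List.filter_eq_self.2; intro k _; simp
  have hmain := pvLoop_bridge lines lines.length 0 PySem.Set.empty [] (by omega) (by omega)
  rw [h0] at hmain
  rw [hmain]
  apply congrArg
  simp only [List.drop_zero, List.nil_append, Nat.sub_zero]
  have hd := pvHeadIdx_decomp lines 0
  rw [h0] at hd
  by_cases h : pvSkipDup lines 0 < lines.length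
  · rw [if_pos h] at hd
    rw [hd]
  · rw [if_neg h] at hd
    rw [hd]
    have hle := pvSkipDup_le lines 0 (by omega)
    exact List.take_of_length_le (by omega)
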